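-- pv_equiv track=rewrite | github.com/chasefinch/cutesy | cutesy/attribute_processors/class_ordering/tailwind.py | _border_specificity
-- ===== SOURCE A (Python) =====
-- _SPACING_AXIS = ("x", "y")
--
-- _SPACING_SIDES = ("t", "b", "r", "l", "s", "e")
--
-- def _border_specificity(name: str) -> int:
--     # border-* < border-x/y-* < border-t/r/b/l-* ; for rounded: rough by hyphen count
--     if name.startswith("border-"):
--         if any(name.startswith(f"border-{axis}-") for axis in _SPACING_AXIS):
--             return 1
--         if any(name.startswith(f"border-{side}-") for side in _SPACING_SIDES):
--             return 2
--         return 0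
--     if name.startswith("rounded-"):
--         return name.count("-")
--     return 0
-- ===== SOURCE B (Python) =====
-- _RANK = {"x": 1, "y": 1, "t": 2, "b": 2, "r": 2, "l": 2, "s": 2, "e": 2}
--
--
-- def _border_specificity(name: str) -> int:
--     # Tokenize once on "-" and classify by the token list: no prefix scans.
--     parts = name.split("-")
--     if len(parts) < 2:
--         return 0
--     if parts[0] == "border":
--         # A side/axis class needs a token after the side token (trailing "-").
--         return _RANK.get(parts[1], 0) if len(parts) >= 3 else 0
--     if parts[0] == "rounded":
--         return len(parts) - 1
--     return 0
-- ===== Notes on version B (the rewrite author's own statement) =====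
-- stated objective: alternative
-- what changed: B tokenizes the name once by splitting on hyphens and classifies the resulting token list (first token selects the family, second token is looked up in a rank table, the hyphen count becomes the token count minus one), replacing A's eight startswith prefix scans and separate count pass.
import Mathlib
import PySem

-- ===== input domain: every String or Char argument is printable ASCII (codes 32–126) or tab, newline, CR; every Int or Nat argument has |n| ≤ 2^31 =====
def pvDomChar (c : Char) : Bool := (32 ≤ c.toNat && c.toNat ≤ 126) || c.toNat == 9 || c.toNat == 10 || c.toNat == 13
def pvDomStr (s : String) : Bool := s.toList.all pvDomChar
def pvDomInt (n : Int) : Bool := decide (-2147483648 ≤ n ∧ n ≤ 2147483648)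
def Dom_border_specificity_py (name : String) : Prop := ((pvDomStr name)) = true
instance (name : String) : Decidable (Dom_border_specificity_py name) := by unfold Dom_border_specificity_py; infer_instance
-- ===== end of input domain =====

-- B tokenizes the name once with split('-') and classifies the token list (rank table on the
-- second token, len(parts)-1 for the hyphen count) instead of A's eight prefix scans; objective: alternative.

-- ===== PORT A =====
def border_specificity_py (name : String) : Int :=
  if PySem.Str.startswith name "border-" then
    -- any(name.startswith(f"border-{axis}-") for axis in _SPACING_AXIS), in tuple order
    if PySem.Str.startswith name "border-x-" || PySem.Str.startswith name "border-y-" then 1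
    else if PySem.Str.startswith name "border-t-" || PySem.Str.startswith name "border-b-" ||
            PySem.Str.startswith name "border-r-" || PySem.Str.startswith name "border-l-" ||
            PySem.Str.startswith name "border-s-" || PySem.Str.startswith name "border-e-" then 2
    else 0
  else if PySem.Str.startswith name "rounded-" then
    (PySem.Str.count name "-" : Int)
  else 0

-- ===== PORT B =====
-- _RANK = {"x": 1, "y": 1, "t": 2, "b": 2, "r": 2, "l": 2, "s": 2, "e": 2}
def pvRank : PySem.Dict String Int :=
  ((((((((PySem.Dict.empty.insert "x" 1).insert "y" 1).insert "t" 2).insert "b" 2).insert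
      "r" 2).insert "l" 2).insert "s" 2).insert "e" 2)

def border_specificity_py_alt (name : String) : Int :=
  -- parts = name.split("-"); the separator "-" is non-empty, so split? always returns some
  let parts := (PySem.Str.split? name "-").getD []
  if parts.length < 2 then 0
  else if parts.getD 0 "" = "border" then
    if 3 ≤ parts.length then pvRank.getD (parts.getD 1 "") 0 else 0
  else if parts.getD 0 "" = "rounded" then (parts.length : Int) - 1
  else 0

-- ===== PRECONDITION & SPEC =====
def Spec_border_specificity_py (name : String) (out : Int) : Prop := out = border_specificity_py_alt name
instance (name : String) (out : Int) : Decidable (Spec_border_specificity_py name out) := by unfold Spec_border_specificity_py; infer_instance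

-- ===== CLAIM (what is proved, stated in full; the proofs are below) =====
def Claim_equal_border_specificity_py : Prop := ∀ (name : String), Dom_border_specificity_py name → Spec_border_specificity_py name (border_specificity_py name)

-- ===== LEMMAS AND PROOFS =====

-- Reference single-char '-' splitter; equals PySem.Chars.splitOn · ['-'] (bridged below).
def dashSplit : List Char → List (List Char)
  | [] => [[]]
  | c :: rest =>
    if c = '-' then [] :: dashSplit rest
    else
      match dashSplit rest with
      | [] => [[c]]
      | p :: ps => (c :: p) :: ps

theorem dashSplit_ne_nil (l : List Char) : dashSplit l ≠ [] := by
  cases l with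
  | nil => simp [dashSplit]
  | cons c rest =>
    simp only [dashSplit]
    split_ifs
    · simp
    · cases h : dashSplit rest <;> simp [h]

def consHead (p : List Char) : List (List Char) → List (List Char)
  | [] => [p]
  | q :: qs => (p ++ q) :: qs

theorem splitOn_go_eq (l : List Char) : ∀ (fuel : ℕ) (cur : List Char) (acc : List (List Char)),
    l.length < fuel →
    PySem.Chars.splitOn.go ['-'] fuel l cur acc = acc.reverse ++ consHead cur.reverse (dashSplit l) := by
  induction l with
  | nil =>
    intro fuel cur acc h
    cases fuel with
    | zero => omega
    | succ f => simp [PySem.Chars.splitOn.go, dashSplit, consHead]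
  | cons c rest ih =>
    intro fuel cur acc h
    cases fuel with
    | zero => simp at h
    | succ f =>
      by_cases hc : c = '-'
      · subst hc
        have : List.isPrefixOf ['-'] ('-' :: rest) = true := by simp [List.isPrefixOf]
        rw [PySem.Chars.splitOn.go]
        simp only [this, if_true, List.length_nil, List.length_singleton, List.drop_succ_cons, List.drop_zero]
        rw [ih f [] (cur.reverse :: acc) (by simp at h; omega)]
        simp [dashSplit, consHead]
        cases hd : dashSplit rest with
        | nil => exact absurd hd (dashSplit_ne_nil rest)
        | cons p ps => simp [consHead]
      · have hpre : List.isPrefixOf ['-'] (c :: rest) = false := by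
          simp [List.isPrefixOf]; exact fun h' => absurd h'.symm hc
        rw [PySem.Chars.splitOn.go]
        simp only [hpre, Bool.false_eq_true, if_false]
        rw [ih f (c :: cur) acc (by simp at h ⊢; omega)]
        simp only [dashSplit, hc, if_false]
        cases hd : dashSplit rest with
        | nil => exact absurd hd (dashSplit_ne_nil rest)
        | cons p ps => simp [consHead]

theorem splitOn_eq_dashSplit (l : List Char) :
    PySem.Chars.splitOn l ['-'] = dashSplit l := by
  rw [PySem.Chars.splitOn, splitOn_go_eq l (l.length + 1) [] [] (by omega)]
  cases hd : dashSplit l with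
  | nil => exact absurd hd (dashSplit_ne_nil l)
  | cons p ps => simp [consHead]

theorem count_go_eq (l : List Char) : ∀ (fuel : ℕ) (acc : ℕ), l.length ≤ fuel →
    PySem.Chars.count.go ['-'] fuel l acc = acc + l.count '-' := by
  induction l with
  | nil => intro fuel acc h; cases fuel <;> simp [PySem.Chars.count.go]
  | cons c rest ih =>
    intro fuel acc h
    cases fuel with
    | zero => simp at h
    | succ f =>
      by_cases hc : c = '-'
      · subst hc
        have : List.isPrefixOf ['-'] ('-' :: rest) = true := by simp [List.isPrefixOf]
        rw [PySem.Chars.count.go]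
        simp only [this, if_true, List.length_nil, List.length_singleton, List.drop_succ_cons, List.drop_zero]
        rw [ih f (acc + 1) (by simp at h; omega)]
        simp [List.count_cons]
        omega
      · have hpre : List.isPrefixOf ['-'] (c :: rest) = false := by
          simp [List.isPrefixOf]; exact fun h' => absurd h'.symm hc
        rw [PySem.Chars.count.go]
        simp only [hpre, Bool.false_eq_true, if_false]
        rw [ih f acc (by simp at h ⊢; omega)]
        simp [List.count_cons, hc]

theorem count_eq_count (l : List Char) : PySem.Chars.count l ['-'] = l.count '-' := by
  rw [PySem.Chars.count]
  simp [count_go_eq l l.length 0 (le_refl _)]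

theorem length_dashSplit (l : List Char) : (dashSplit l).length = l.count '-' + 1 := by
  induction l with
  | nil => simp [dashSplit]
  | cons c rest ih =>
    simp only [dashSplit]
    by_cases hc : c = '-'
    · simp [hc, List.count_cons, ih]
    · simp only [hc, if_false]
      cases hd : dashSplit rest with
      | nil => exact absurd hd (dashSplit_ne_nil rest)
      | cons p ps => simp [hd] at ih ⊢; simp [List.count_cons, hc, ih]

theorem dashSplit_append (a b : List Char) (h : '-' ∉ a) :
    dashSplit (a ++ '-' :: b) = a :: dashSplit b := by
  induction a with
  | nil => simp [dashSplit]
  | cons c rest ih =>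
    simp at h
    simp only [List.cons_append, dashSplit]
    rw [if_neg (Ne.symm h.1), ih h.2]

theorem exists_decomp (l : List Char) (h : '-' ∈ l) :
    ∃ a b, '-' ∉ a ∧ l = a ++ '-' :: b := by
  induction l with
  | nil => simp at h
  | cons c rest ih =>
    by_cases hc : c = '-'
    · exact ⟨[], rest, by simp, by simp [hc]⟩
    · have : '-' ∈ rest := by simp at h; tauto
      obtain ⟨a, b, ha, hl⟩ := ih this
      exact ⟨c :: a, b, by simp [ha]; exact fun h' => hc h'.symm, by simp [hl]⟩

theorem startswith_decide (s p : List Char) : PySem.Chars.startswith s p = decide (p <+: s) := by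
  by_cases h : p <+: s
  · rw [(PySem.Chars.startswith_iff s p).mpr h]; simp [h]
  · simp only [h, decide_false]
    exact (Bool.not_eq_true _).mp (fun ht => h ((PySem.Chars.startswith_iff s p).mp ht))

theorem beq_ofList_false (k : String) (a : List Char) (h : k.toList ≠ a) :
    (k == String.ofList a) = false := by
  rw [beq_eq_false_iff_ne]
  intro he
  exact h (by rw [he, String.toList_ofList])

theorem rank_empty : pvRank.getD "" 0 = 0 := by decide

theorem rank_single (c : Char) :
    pvRank.getD (String.ofList [c]) 0 =
      (if c = 'x' ∨ c = 'y' then 1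
       else if c = 't' ∨ c = 'b' ∨ c = 'r' ∨ c = 'l' ∨ c = 's' ∨ c = 'e' then 2 else 0) := by
  by_cases hx : c = 'x'; · subst hx; decide
  by_cases hy : c = 'y'; · subst hy; decide
  by_cases ht : c = 't'; · subst ht; decide
  by_cases hb : c = 'b'; · subst hb; decide
  by_cases hr : c = 'r'; · subst hr; decide
  by_cases hl : c = 'l'; · subst hl; decide
  by_cases hs : c = 's'; · subst hs; decide
  by_cases he : c = 'e'; · subst he; decide
  simp only [hx, hy, ht, hb, hr, hl, hs, he, or_self, if_false]
  simp [pvRank, PySem.Dict.getD, PySem.Dict.get?, PySem.Dict.empty, PySem.Dict.insert,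
    List.find?,
    beq_ofList_false "x" [c] (by simp; exact fun h => hx h.symm),
    beq_ofList_false "y" [c] (by simp; exact fun h => hy h.symm),
    beq_ofList_false "t" [c] (by simp; exact fun h => ht h.symm),
    beq_ofList_false "b" [c] (by simp; exact fun h => hb h.symm),
    beq_ofList_false "r" [c] (by simp; exact fun h => hr h.symm),
    beq_ofList_false "l" [c] (by simp; exact fun h => hl h.symm),
    beq_ofList_false "s" [c] (by simp; exact fun h => hs h.symm),
    beq_ofList_false "e" [c] (by simp; exact fun h => he h.symm)]

theorem rank_long (c d : Char) (t : List Char) :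
    pvRank.getD (String.ofList (c :: d :: t)) 0 = 0 := by
  simp [pvRank, PySem.Dict.getD, PySem.Dict.get?, PySem.Dict.empty, PySem.Dict.insert,
    List.find?,
    beq_ofList_false "x" (c :: d :: t) (by simp),
    beq_ofList_false "y" (c :: d :: t) (by simp),
    beq_ofList_false "t" (c :: d :: t) (by simp),
    beq_ofList_false "b" (c :: d :: t) (by simp),
    beq_ofList_false "r" (c :: d :: t) (by simp),
    beq_ofList_false "l" (c :: d :: t) (by simp),
    beq_ofList_false "s" (c :: d :: t) (by simp),
    beq_ofList_false "e" (c :: d :: t) (by simp)]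

theorem ofList_eq_iff (a : List Char) (s : String) :
    String.ofList a = s ↔ a = s.toList := by
  constructor
  · intro h; rw [← h, String.toList_ofList]
  · intro h; rw [h, String.ofList_toList]

theorem bs_eq (name : String) : border_specificity_py name = border_specificity_py_alt name := by
  have hparts : (PySem.Str.split? name "-").getD [] = (dashSplit name.toList).map String.ofList := by
    simp [PySem.Str.split?, PySem.Chars.split?, show ("-" : String).toList = ['-'] from rfl,
      splitOn_eq_dashSplit]
  simp only [border_specificity_py, border_specificity_py_alt, PySem.Str.startswith,
    startswith_decide, hparts]
  by_cases hb : ("border-" : String).toList <+: name.toList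
  · obtain ⟨r, hr⟩ := hb
    have hds : dashSplit name.toList = "border".toList :: dashSplit r := by
      rw [← hr]
      exact dashSplit_append "border".toList r (by decide)
    have hbp : ("border-" : String).toList <+: name.toList := ⟨r, hr⟩
    have px : (("border-x-" : String).toList <+: name.toList) ↔ (['x', '-'] <+: r) := by
      rw [← hr, show ("border-x-" : String).toList = ("border-" : String).toList ++ ['x', '-'] from rfl]
      exact List.prefix_append_right_inj _
    have py : (("border-y-" : String).toList <+: name.toList) ↔ (['y', '-'] <+: r) := by
      rw [← hr, show ("border-y-" : String).toList = ("border-" : String).toList ++ ['y', '-'] from rfl]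
      exact List.prefix_append_right_inj _
    have pt : (("border-t-" : String).toList <+: name.toList) ↔ (['t', '-'] <+: r) := by
      rw [← hr, show ("border-t-" : String).toList = ("border-" : String).toList ++ ['t', '-'] from rfl]
      exact List.prefix_append_right_inj _
    have pb2 : (("border-b-" : String).toList <+: name.toList) ↔ (['b', '-'] <+: r) := by
      rw [← hr, show ("border-b-" : String).toList = ("border-" : String).toList ++ ['b', '-'] from rfl]
      exact List.prefix_append_right_inj _
    have pr2 : (("border-r-" : String).toList <+: name.toList) ↔ (['r', '-'] <+: r) := by
      rw [← hr, show ("border-r-" : String).toList = ("border-" : String).toList ++ ['r', '-'] from rfl]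
      exact List.prefix_append_right_inj _
    have pl : (("border-l-" : String).toList <+: name.toList) ↔ (['l', '-'] <+: r) := by
      rw [← hr, show ("border-l-" : String).toList = ("border-" : String).toList ++ ['l', '-'] from rfl]
      exact List.prefix_append_right_inj _
    have ps2 : (("border-s-" : String).toList <+: name.toList) ↔ (['s', '-'] <+: r) := by
      rw [← hr, show ("border-s-" : String).toList = ("border-" : String).toList ++ ['s', '-'] from rfl]
      exact List.prefix_append_right_inj _
    have pe : (("border-e-" : String).toList <+: name.toList) ↔ (['e', '-'] <+: r) := by
      rw [← hr, show ("border-e-" : String).toList = ("border-" : String).toList ++ ['e', '-'] from rfl]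
      exact List.prefix_append_right_inj _
    simp only [hbp, decide_true, if_true, px, py, pt, pb2, pr2, pl, ps2, pe, hds]
    rcases r with _ | ⟨c, _ | ⟨d, r3⟩⟩
    · -- r = []
      simp [dashSplit, List.getD, ofList_eq_iff]
    · -- r = [c]
      by_cases hc : c = '-'
      · subst hc
        simp [List.cons_prefix_cons, dashSplit, List.getD, ofList_eq_iff, rank_empty]
      · simp [List.cons_prefix_cons, dashSplit, hc, List.getD, ofList_eq_iff]
    · -- r = c :: d :: r3
      by_cases hc : c = '-'
      · subst hc
        have h2 : dashSplit ('-' :: d :: r3) = [] :: dashSplit (d :: r3) := by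
          simp [dashSplit]
        cases hd3 : dashSplit (d :: r3) with
        | nil => exact absurd hd3 (dashSplit_ne_nil _)
        | cons p ps =>
          simp only [List.cons_prefix_cons, h2, hd3, List.map_cons, List.length_cons,
            List.getD, List.getElem?_cons_zero, List.getElem?_cons_succ, Option.getD_some,
            ofList_eq_iff]
          simp [rank_empty]
      · by_cases hd : d = '-'
        · subst hd
          have h2 : dashSplit (c :: '-' :: r3) = [c] :: dashSplit r3 := by
            exact dashSplit_append [c] r3 (by simpa using fun h => hc h.symm)
          have hlen : 1 ≤ (dashSplit r3).length := by
            cases hq : dashSplit r3 with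
            | nil => exact absurd hq (dashSplit_ne_nil _)
            | cons p ps => simp
          simp only [h2, List.map_cons, List.length_cons,
            List.getD, List.getElem?_cons_zero, List.getElem?_cons_succ, Option.getD_some,
            ofList_eq_iff, rank_single]
          have hg : ¬ ((dashSplit r3).map String.ofList).length + 1 + 1 < 2 := by omega
          have hg3 : 3 ≤ ((dashSplit r3).map String.ofList).length + 1 + 1 := by
            simp only [List.length_map]; omega
          simp only [if_neg hg, if_pos hg3,
            if_pos (show ("border" : String).toList = ("border" : String).toList from rfl)]
          have hpref : ∀ z : Char, ([z, '-'] <+: c :: '-' :: r3) ↔ c = z := by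
            intro z
            constructor
            · intro h
              rw [List.cons_prefix_cons] at h
              exact h.1.symm
            · intro h
              exact ⟨r3, by rw [← h]; rfl⟩
          simp only [hpref]
          by_cases hx : c = 'x'; · simp [hx]
          by_cases hy : c = 'y'; · simp [hy, hx]
          by_cases ht : c = 't'; · simp [ht, hx, hy]
          by_cases hbb : c = 'b'; · simp [hbb, hx, hy, ht]
          by_cases hrr : c = 'r'; · simp [hrr, hx, hy, ht, hbb]
          by_cases hl : c = 'l'; · simp [hl, hx, hy, ht, hbb, hrr]
          by_cases hs : c = 's'; · simp [hs, hx, hy, ht, hbb, hrr, hl]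
          by_cases he : c = 'e'; · simp [he, hx, hy, ht, hbb, hrr, hl, hs]
          simp [hx, hy, ht, hbb, hrr, hl, hs, he]
        · -- c ≠ '-', d ≠ '-': no side prefix matches; B sees a multi-char token (or too few tokens)
          cases hd3 : dashSplit (d :: r3) with
          | nil => exact absurd hd3 (dashSplit_ne_nil _)
          | cons p ps =>
            have h3 : dashSplit (c :: d :: r3) = (c :: p) :: ps := by
              rw [show dashSplit (c :: d :: r3) =
                    (if c = '-' then [] :: dashSplit (d :: r3)
                     else match dashSplit (d :: r3) with
                          | [] => [[c]]
                          | p :: ps => (c :: p) :: ps) from rfl,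
                  if_neg hc, hd3]
            have hp : ∃ p2, p = d :: p2 := by
              rw [show dashSplit (d :: r3) =
                    (if d = '-' then [] :: dashSplit r3
                     else match dashSplit r3 with
                          | [] => [[d]]
                          | q :: qs => (d :: q) :: qs) from rfl,
                  if_neg hd] at hd3
              rcases hq : dashSplit r3 with _ | ⟨p2, ps2⟩
              · exact absurd hq (dashSplit_ne_nil _)
              · rw [hq] at hd3
                simp only [List.cons.injEq] at hd3
                exact ⟨p2, hd3.1.symm⟩
            obtain ⟨p2, hpd⟩ := hp
            subst hpd
            have hnp : ∀ z : Char, ¬ ([z, '-'] <+: c :: d :: r3) := by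
              intro z hz
              rw [List.cons_prefix_cons] at hz
              rw [List.cons_prefix_cons] at hz
              exact hd hz.2.1.symm
            simp only [h3, List.map_cons, List.length_cons, List.getD,
              List.getElem?_cons_zero, List.getElem?_cons_succ, Option.getD_some,
              ofList_eq_iff, hnp, decide_false]
            simp [rank_long]
  · simp only [hb, decide_false, Bool.false_eq_true, if_false]
    by_cases hro : ("rounded-" : String).toList <+: name.toList
    · obtain ⟨r, hr⟩ := hro
      have hds : dashSplit name.toList = "rounded".toList :: dashSplit r := by
        rw [← hr]
        exact dashSplit_append "rounded".toList r (by decide)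
      have hcnt : name.toList.count '-' = r.count '-' + 1 := by
        rw [← hr]
        simp [List.count_append, List.count_cons]
      have hlr := length_dashSplit r
      simp only [show decide (("rounded-" : String).toList <+: name.toList) = true from
          decide_eq_true ⟨r, hr⟩, if_true, hds, List.map_cons, List.length_cons, List.getD,
        List.getElem?_cons_zero, Option.getD_some, ofList_eq_iff,
        PySem.Str.count, show ("-" : String).toList = ['-'] from rfl, count_eq_count, hcnt]
      have hlen1 : 1 ≤ ((dashSplit r).map String.ofList).length := by
        cases hq : dashSplit r with
        | nil => exact absurd hq (dashSplit_ne_nil _)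
        | cons p ps => simp
      have hg : ¬ ((dashSplit r).map String.ofList).length + 1 < 2 := by omega
      simp only [List.length_map, hlr]
      split_ifs with h1 h2 h3
      · omega
      · exact absurd h2 (by decide)
      · exact absurd h2 (by decide)
      · push_cast
        ring
    · simp only [hro, decide_false, Bool.false_eq_true, if_false]
      by_cases hm : '-' ∈ name.toList
      · obtain ⟨a, b, ha, hab⟩ := exists_decomp name.toList hm
        have hds : dashSplit name.toList = a :: dashSplit b := by
          rw [hab]; exact dashSplit_append a b ha
        have hanb : ¬ a = ("border" : String).toList := by
          intro h
          exact hb ⟨b, by rw [hab, h]; rfl⟩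
        have hanr : ¬ a = ("rounded" : String).toList := by
          intro h
          exact hro ⟨b, by rw [hab, h]; rfl⟩
        simp only [hds, List.map_cons, List.length_cons, List.getD,
          List.getElem?_cons_zero, Option.getD_some, ofList_eq_iff, hanb, hanr, if_false]
        split_ifs <;> rfl
      · have h1 : (dashSplit name.toList).length = 1 := by
          rw [length_dashSplit]
          simp [List.count_eq_zero_of_not_mem hm]
        cases hq : dashSplit name.toList with
        | nil => exact absurd hq (dashSplit_ne_nil _)
        | cons p ps =>
          rw [hq] at h1
          simp at h1
          simp [hq, h1]

-- ===== VERDICT (by name: the statement is the Claim_ definition above) =====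
theorem border_specificity_py_spec : Claim_equal_border_specificity_py := by
  intro name _
  unfold Spec_border_specificity_py
  exact bs_eq name
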